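-- pv_equiv track=rewrite | github.com/Negative273DegreesCelsius/AdventOfCode | 2022/Day9/Day9_2022.py | tailAdj
-- ===== SOURCE A (Python) =====
-- def tailAdj(oldHPos, newHPos, tPos):
--     if (len(tPos) == 0):
--         return oldHPos
--     hXPos = newHPos[1]
--     hYPos = newHPos[0]
--     checkPos = [
--         [hYPos, hXPos - 1], [hYPos, hXPos + 1], [hYPos - 1, hXPos], [hYPos + 1, hXPos],
--         [hYPos - 1, hXPos - 1], [hYPos - 1, hXPos + 1], [hYPos + 1, hXPos + 1], [hYPos + 1, hXPos - 1],
--         [hYPos, hXPos]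
--     ]
--     for pos in checkPos:
--         if (pos[0] == tPos[0] and pos[1] == tPos[1]): # checks if adjacent
--             return tPos
--     return oldHPos
-- ===== SOURCE B (Python) =====
-- def tailAdj(oldHPos, newHPos, tPos):
--     if len(tPos) == 0:
--         return oldHPos
--     if abs(tPos[0] - newHPos[0]) <= 1 and abs(tPos[1] - newHPos[1]) <= 1:
--         return tPos
--     return oldHPos
-- ===== Notes on version B (the rewrite author's own statement) =====
-- stated objective: simpler
-- what changed: replaces the enumeration of all nine neighbour cells and the linear scan over them with a direct Chebyshev-distance bound (|dy|<=1 and |dx|<=1)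
import Mathlib
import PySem

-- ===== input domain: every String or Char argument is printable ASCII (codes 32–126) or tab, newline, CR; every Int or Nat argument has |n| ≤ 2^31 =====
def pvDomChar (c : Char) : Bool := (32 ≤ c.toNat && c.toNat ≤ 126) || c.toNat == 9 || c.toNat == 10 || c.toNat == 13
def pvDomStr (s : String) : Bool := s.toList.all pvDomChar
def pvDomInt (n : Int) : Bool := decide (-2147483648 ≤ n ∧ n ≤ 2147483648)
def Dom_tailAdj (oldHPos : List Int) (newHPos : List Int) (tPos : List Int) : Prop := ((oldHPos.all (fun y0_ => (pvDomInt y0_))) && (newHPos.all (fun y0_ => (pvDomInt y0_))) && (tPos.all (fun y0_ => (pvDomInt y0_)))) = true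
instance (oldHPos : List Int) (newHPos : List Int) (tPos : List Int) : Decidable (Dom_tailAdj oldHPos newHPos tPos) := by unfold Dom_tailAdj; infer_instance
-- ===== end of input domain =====

-- B replaces A's nine-cell neighbour enumeration and scan with a direct Chebyshev-distance test (simpler, same result).

-- ===== PORT A =====
-- the 'for pos in checkPos' loop: first matching pos returns tPos, otherwise fall through to oldHPos;
-- pos[0]==tPos[0] is evaluated before tPos[1] (Python's short-circuit 'and'); out-of-range index = IndexError,
-- modelled by pyGet? = none; those inputs are outside Pre_tailAdj, the port returns [] there.
def tailAdjLoop (oldHPos : List Int) (tPos : List Int) : List (List Int) → List Int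
  | [] => oldHPos
  | pos :: rest =>
    match PySem.List.pyGet? pos 0, PySem.List.pyGet? tPos 0 with
    | some p0, some t0 =>
      if p0 = t0 then
        match PySem.List.pyGet? pos 1, PySem.List.pyGet? tPos 1 with
        | some p1, some t1 => if p1 = t1 then tPos else tailAdjLoop oldHPos tPos rest
        | _, _ => []   -- IndexError (outside Pre_)
      else tailAdjLoop oldHPos tPos rest
    | _, _ => []       -- IndexError (outside Pre_)

def tailAdj (oldHPos : List Int) (newHPos : List Int) (tPos : List Int) : List Int :=
  if tPos.length = 0 then oldHPos
  else
    match PySem.List.pyGet? newHPos 1, PySem.List.pyGet? newHPos 0 with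
    | some hXPos, some hYPos =>
      let checkPos : List (List Int) :=
        [[hYPos, hXPos - 1], [hYPos, hXPos + 1], [hYPos - 1, hXPos], [hYPos + 1, hXPos],
         [hYPos - 1, hXPos - 1], [hYPos - 1, hXPos + 1], [hYPos + 1, hXPos + 1], [hYPos + 1, hXPos - 1],
         [hYPos, hXPos]]
      tailAdjLoop oldHPos tPos checkPos
    | _, _ => []       -- IndexError (outside Pre_)

-- ===== PORT B =====
-- abs(tPos[0]-newHPos[0]) <= 1 and abs(tPos[1]-newHPos[1]) <= 1, with Python's evaluation order
def tailAdj_alt (oldHPos : List Int) (newHPos : List Int) (tPos : List Int) : List Int :=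
  if tPos.length = 0 then oldHPos
  else
    match PySem.List.pyGet? tPos 0, PySem.List.pyGet? newHPos 0 with
    | some t0, some h0 =>
      if (t0 - h0).natAbs ≤ 1 then
        match PySem.List.pyGet? tPos 1, PySem.List.pyGet? newHPos 1 with
        | some t1, some h1 => if (t1 - h1).natAbs ≤ 1 then tPos else oldHPos
        | _, _ => []   -- IndexError (outside Pre_)
      else oldHPos
    | _, _ => []       -- IndexError (outside Pre_)

-- ===== PRECONDITION & SPEC =====
-- Pre_ is exactly where the Python A returns without raising: tPos empty, or newHPos has both coordinates
-- and tPos either has both coordinates or is a singleton whose sole entry is far from newHPos[0]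
-- (then A's short-circuit 'and' never touches the missing tPos[1]).
def Pre_tailAdj (oldHPos : List Int) (newHPos : List Int) (tPos : List Int) : Prop :=
  tPos = [] ∨ (2 ≤ newHPos.length ∧
    (2 ≤ tPos.length ∨ (tPos.length = 1 ∧ 1 < (tPos.headI - newHPos.headI).natAbs)))
instance (oldHPos : List Int) (newHPos : List Int) (tPos : List Int) : Decidable (Pre_tailAdj oldHPos newHPos tPos) := by unfold Pre_tailAdj; infer_instance
def pvWitness_tailAdj : List Int × List Int × List Int := ([0, 0], [1, 1], [1, 2])

def Spec_tailAdj (oldHPos : List Int) (newHPos : List Int) (tPos : List Int) (out : List Int) : Prop := out = tailAdj_alt oldHPos newHPos tPos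
instance (oldHPos : List Int) (newHPos : List Int) (tPos : List Int) (out : List Int) : Decidable (Spec_tailAdj oldHPos newHPos tPos out) := by unfold Spec_tailAdj; infer_instance

-- ===== CLAIM (what is proved, stated in full; the proofs are below) =====
def Claim_equal_tailAdj : Prop := ∀ (oldHPos : List Int) (newHPos : List Int) (tPos : List Int), Dom_tailAdj oldHPos newHPos tPos → Pre_tailAdj oldHPos newHPos tPos → Spec_tailAdj oldHPos newHPos tPos (tailAdj oldHPos newHPos tPos)

-- ===== LEMMAS AND PROOFS =====

-- ===== VERDICT (by name: the statement is the Claim_ definition above) =====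
theorem pvGet1 (a b : Int) (l : List Int) : PySem.List.pyGet? (a::b::l) 1 = some b := by
  rw [show (1:Int) = ((1:Nat):Int) by norm_num, PySem.List.pyGet?_natCast]; rfl
theorem pvGet0 (a : Int) (l : List Int) : PySem.List.pyGet? (a::l) 0 = some a := by
  rw [show (0:Int) = ((0:Nat):Int) by norm_num, PySem.List.pyGet?_natCast]; rfl
theorem pvGetNone (a : Int) : PySem.List.pyGet? [a] 1 = none := by
  rw [show (1:Int) = ((1:Nat):Int) by norm_num, PySem.List.pyGet?_natCast]; rfl

theorem tailAdj_spec : Claim_equal_tailAdj := by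
  intro oldHPos newHPos tPos _ hpre
  unfold Spec_tailAdj
  rcases tPos with _ | ⟨t0, _ | ⟨t1, tr⟩⟩
  · simp [tailAdj, tailAdj_alt]
  · -- tPos = [t0]: Pre_ forces newHPos = h0 :: h1 :: _ with |t0 - h0| > 1
    rcases hpre with h | ⟨hlen, h | ⟨_, hfar⟩⟩
    · simp at h
    · simp at h
    · rcases newHPos with _ | ⟨h0, _ | ⟨h1, hr⟩⟩ <;> simp at hlen
      simp only [List.headI] at hfar
      simp only [tailAdj, tailAdj_alt, tailAdjLoop, pvGet0, pvGet1, pvGetNone]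
      norm_num
      split_ifs <;> first | rfl | omega
  · rcases hpre with h | ⟨hlen, _⟩
    · simp at h
    · rcases newHPos with _ | ⟨h0, _ | ⟨h1, hr⟩⟩ <;> simp at hlen
      simp only [tailAdj, tailAdj_alt, tailAdjLoop, pvGet0, pvGet1]
      norm_num
      split_ifs <;> first | rfl | omega
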